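-- pv_equiv track=rewrite | github.com/isruihu/SlideASR-Bench | evaluation/slide_asr_evaluation/utils.py | merge_single_letters
-- ===== SOURCE A (Python) =====
-- def merge_single_letters(s):
--     """
--     Combine adjacent single letters separated by spaces.
--     Args:
--         s (str): input string
--     Returns:
--         str: merged string
--     """
--     words = s.split()
--     current = []
--     result = []
--     for word in words:
--         if not word:  # 处理空字符串的情况
--             if current:
--                 result.append(''.join(current))
--                 current = []
--             result.append(word)
--             continue
--         first_char = word[0]
--         remaining = word[1:] if len(word) > 1 else ''
--         if (first_char.islower() or first_char.isupper()):
--             valid_remaining = (remaining == 's' or remaining == "'s")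
--             if remaining == '' or valid_remaining:
--                 current.append(first_char)
--                 if remaining:
--                     current.append(remaining)
--             else:
--                 if current:
--                     result.append(''.join(current))
--                     current = []
--                 result.append(word)
--         else:
--             if current:
--                 result.append(''.join(current))
--                 current = []
--             result.append(word)
--     if current:
--         result.append(''.join(current))
--     return ' '.join(result)
-- ===== SOURCE B (Python) =====
-- def _mergeable(w):
--     return (w[0].islower() or w[0].isupper()) and w[1:] in ('', 's', "'s")
--
--
-- def merge_single_letters(s):
--     """
--     Combine adjacent single letters separated by spaces.
--     """
--     words = s.split()
--     out = []
--     i, n = 0, len(words)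
--     while i < n:
--         if _mergeable(words[i]):
--             j = i
--             while j < n and _mergeable(words[j]):
--                 j += 1
--             out.append(''.join(words[i:j]))
--             i = j
--         else:
--             out.append(words[i])
--             i += 1
--     return ' '.join(out)
-- ===== Notes on version B (the rewrite author's own statement) =====
-- stated objective: simpler
-- what changed: A single mergeability predicate plus a maximal-run scan over the split words replaces A's stateful fold that threads a pending-letters buffer and flushes it at four separate places.
import Mathlib
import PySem

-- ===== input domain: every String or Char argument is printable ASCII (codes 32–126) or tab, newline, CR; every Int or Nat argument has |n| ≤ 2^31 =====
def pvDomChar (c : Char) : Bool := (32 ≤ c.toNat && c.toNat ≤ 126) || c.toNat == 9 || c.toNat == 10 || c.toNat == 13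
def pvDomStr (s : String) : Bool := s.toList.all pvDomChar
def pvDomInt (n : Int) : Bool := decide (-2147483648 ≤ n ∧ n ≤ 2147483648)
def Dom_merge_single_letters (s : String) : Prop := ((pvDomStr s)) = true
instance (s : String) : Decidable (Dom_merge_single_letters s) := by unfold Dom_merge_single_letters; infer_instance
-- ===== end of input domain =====

-- B replaces A's stateful fold (a pending-letters buffer flushed at four places) by a mergeability
-- predicate plus a maximal-run scan; same cost, simpler decomposition. Ports work on s.toList
-- via PySem.Chars (islower/isupper are exact on the ASCII domain).

-- ===== PORT A =====
-- one step of A's `for word in words` loop; state = (pending buffer, result)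
def mslStepA (st : List (List Char) × List (List Char)) (word : List Char) :
    List (List Char) × List (List Char) :=
  match word with
  | [] =>  -- `if not word:` branch
      (([] : List (List Char)),
       (if st.1 = [] then st.2 else st.2 ++ [PySem.Chars.join [] st.1]) ++ [word])
  | first_char :: _ =>
      let remaining : List Char :=
        if PySem.Chars.len word > 1 then PySem.Chars.slice word (some 1) none else []
      if PySem.Chars.islower first_char || PySem.Chars.isupper first_char then
        let valid_remaining := remaining = ['s'] || remaining = ['\'', 's']
        if remaining = [] || valid_remaining then
          (st.1 ++ [[first_char]] ++ (if remaining = [] then [] else [remaining]), st.2)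
        else
          (([] : List (List Char)),
           (if st.1 = [] then st.2 else st.2 ++ [PySem.Chars.join [] st.1]) ++ [word])
      else
        (([] : List (List Char)),
         (if st.1 = [] then st.2 else st.2 ++ [PySem.Chars.join [] st.1]) ++ [word])

def merge_single_letters (s : String) : String :=
  let words := PySem.Chars.split₀ s.toList
  let st := words.foldl mslStepA ([], [])
  let result := if st.1 = [] then st.2 else st.2 ++ [PySem.Chars.join [] st.1]
  String.ofList (PySem.Chars.join [' '] result)

-- ===== PORT B =====
-- Source B's _mergeable(w): w[0] is an (ASCII) letter and w[1:] in ('', 's', "'s")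
def mslMergeable (w : List Char) : Bool :=
  match w with
  | [] => false
  | c :: rest =>
      (PySem.Chars.islower c || PySem.Chars.isupper c) &&
        (rest = [] || rest = ['s'] || rest = ['\'', 's'])

-- Source B's inner `while j < n and _mergeable(words[j])`: the maximal mergeable run and the rest
def mslSpan : List (List Char) → List (List Char) × List (List Char)
  | [] => ([], [])
  | w :: ws =>
      if mslMergeable w then ((w :: (mslSpan ws).1), (mslSpan ws).2)
      else ([], w :: ws)

theorem mslSpan_snd_length_le : ∀ ws : List (List Char), (mslSpan ws).2.length ≤ ws.length := by
  intro ws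
  induction ws with
  | nil => simp [mslSpan]
  | cons w ws ih =>
      by_cases h : mslMergeable w = true
      · simp [mslSpan, h]
        exact Nat.le_succ_of_le ih
      · simp [mslSpan, h]

-- Source B's outer `while i < n` loop over the remaining words
def mslGo : List (List Char) → List (List Char)
  | [] => []
  | w :: ws =>
      if h : mslMergeable w then
        PySem.Chars.join [] (mslSpan (w :: ws)).1 :: mslGo (mslSpan (w :: ws)).2
      else
        w :: mslGo ws
termination_by ws => ws.length
decreasing_by
  · simp [mslSpan, h]
    exact mslSpan_snd_length_le ws
  · simp

def merge_single_letters_alt (s : String) : String :=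
  String.ofList (PySem.Chars.join [' '] (mslGo (PySem.Chars.split₀ s.toList)))

-- ===== PRECONDITION & SPEC =====
def Spec_merge_single_letters (s : String) (out : String) : Prop := out = merge_single_letters_alt s
instance (s : String) (out : String) : Decidable (Spec_merge_single_letters s out) := by unfold Spec_merge_single_letters; infer_instance

-- ===== CLAIM (what is proved, stated in full; the proofs are below) =====
def Claim_equal_merge_single_letters : Prop := ∀ (s : String), Dom_merge_single_letters s → Spec_merge_single_letters s (merge_single_letters s)

-- ===== LEMMAS AND PROOFS =====

-- the pieces A appends to its buffer for a mergeable word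
def mslPieces (w : List Char) : List (List Char) :=
  match w with
  | [] => []
  | c :: rest => [c] :: (if rest = [] then [] else [rest])

-- A's loop abstracted: the result suffix produced from buffer `cur` and remaining words
def mslGoA : List (List Char) → List (List Char) → List (List Char)
  | cur, [] => if cur = [] then [] else [PySem.Chars.join [] cur]
  | cur, w :: ws =>
      if mslMergeable w then
        mslGoA (cur ++ mslPieces w) ws
      else
        (if cur = [] then [] else [PySem.Chars.join [] cur]) ++ w :: mslGoA [] ws

theorem mslJoin_nil_cons (a : List Char) (l : List (List Char)) :
    PySem.Chars.join [] (a :: l) = a ++ PySem.Chars.join [] l := by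
  cases l with
  | nil => simp [PySem.Chars.join, List.intercalate, List.intersperse]
  | cons b m => simp [PySem.Chars.join, List.intercalate, List.intersperse]

theorem mslJoin_nil_append (l₁ l₂ : List (List Char)) :
    PySem.Chars.join [] (l₁ ++ l₂) = PySem.Chars.join [] l₁ ++ PySem.Chars.join [] l₂ := by
  induction l₁ with
  | nil => simp
  | cons a l ih => simp [mslJoin_nil_cons, ih]

theorem mslPieces_join (w : List Char) (h : mslMergeable w = true) :
    PySem.Chars.join [] (mslPieces w) = w ∧ mslPieces w ≠ [] := by
  cases w with
  | nil => simp [mslMergeable] at h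
  | cons c rest =>
      by_cases hr : rest = [] <;>
        simp [mslPieces, hr, mslJoin_nil_cons]

theorem mslGo_cons_pos (w : List Char) (ws : List (List Char)) (h : mslMergeable w = true) :
    mslGo (w :: ws) =
      PySem.Chars.join [] (mslSpan (w :: ws)).1 :: mslGo (mslSpan (w :: ws)).2 := by
  rw [mslGo.eq_def]; simp [h]

theorem mslGo_cons_neg (w : List Char) (ws : List (List Char)) (h : ¬ mslMergeable w = true) :
    mslGo (w :: ws) = w :: mslGo ws := by
  rw [mslGo.eq_def]; simp [h]

-- A's word-level `remaining` is just the tail of the word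
theorem mslRemaining_eq (c : Char) (rest : List Char) :
    (if PySem.Chars.len (c :: rest) > 1 then PySem.Chars.slice (c :: rest) (some 1) none
     else []) = rest := by
  by_cases hr : rest = []
  · subst hr; simp [PySem.Chars.len]
  · have hlen : PySem.Chars.len (c :: rest) > 1 := by
      have : 0 < rest.length := List.length_pos_iff.mpr hr
      simp [PySem.Chars.len_eq]
      omega
    simp [PySem.Chars.slice_eq_listSlice, PySem.List.slice_from_one]

theorem foldA_eq_goA : ∀ (words cur res : List (List Char)),
    (if (words.foldl mslStepA (cur, res)).1 = [] then (words.foldl mslStepA (cur, res)).2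
     else (words.foldl mslStepA (cur, res)).2 ++
       [PySem.Chars.join [] (words.foldl mslStepA (cur, res)).1]) =
      res ++ mslGoA cur words := by
  intro words
  induction words with
  | nil => intro cur res; by_cases h : cur = [] <;> simp [mslGoA, h]
  | cons w ws ih =>
      intro cur res
      simp only [List.foldl_cons]
      cases w with
      | nil =>
          have hm : mslMergeable ([] : List Char) = false := by simp [mslMergeable]
          simp only [mslStepA]
          rw [ih]
          by_cases h : cur = [] <;> simp [mslGoA, hm, h]
      | cons c rest =>
          simp only [mslStepA, mslRemaining_eq]
          by_cases hl : (PySem.Chars.islower c || PySem.Chars.isupper c) = true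
          · by_cases hv : (decide (rest = []) || (decide (rest = ['s']) ||
                decide (rest = ['\'', 's']))) = true
            · have hm : mslMergeable (c :: rest) = true := by
                simp [mslMergeable]; simp at hl hv; tauto
              simp only [hl, hv]
              rw [ih]
              by_cases hr : rest = []
              · subst hr
                simp [mslGoA, hm, mslPieces]
              · simp [mslGoA, hm, mslPieces, hr]
            · have hm : mslMergeable (c :: rest) = false := by
                simp [mslMergeable]; simp at hv; intro _; tauto
              simp only [hl, hv]
              rw [ih]
              by_cases h : cur = [] <;> simp [mslGoA, hm, h]
          · have hm : mslMergeable (c :: rest) = false := by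
              simp [mslMergeable]; simp at hl; simp [hl]
            simp only [hl]
            rw [ih]
            by_cases h : cur = [] <;> simp [mslGoA, hm, h]

theorem goA_eq_go : ∀ words : List (List Char),
    (mslGoA [] words = mslGo words) ∧
    (∀ cur, cur ≠ [] → mslGoA cur words =
      (PySem.Chars.join [] cur ++ PySem.Chars.join [] (mslSpan words).1) ::
        mslGo (mslSpan words).2) := by
  intro words
  induction words with
  | nil =>
      refine ⟨by simp [mslGoA, mslGo], ?_⟩
      intro cur hc
      simp [mslGoA, mslSpan, mslGo, hc]
  | cons w ws ih =>
      constructor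
      · by_cases h : mslMergeable w = true
        · have hp := mslPieces_join w h
          rw [show mslGoA [] (w :: ws) = mslGoA ([] ++ mslPieces w) ws from by
                simp [mslGoA, h]]
          rw [List.nil_append, ih.2 (mslPieces w) hp.2, hp.1]
          rw [mslGo_cons_pos w ws h]
          simp [mslSpan, h, mslJoin_nil_cons]
        · rw [mslGo_cons_neg w ws h]
          simp [mslGoA, h, ih.1]
      · intro cur hc
        by_cases h : mslMergeable w = true
        · have hp := mslPieces_join w h
          rw [show mslGoA cur (w :: ws) = mslGoA (cur ++ mslPieces w) ws from by
                simp [mslGoA, h]]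
          rw [ih.2 (cur ++ mslPieces w) (by simp [hp.2])]
          rw [mslJoin_nil_append, hp.1]
          simp [mslSpan, h, mslJoin_nil_cons]
        · rw [show mslGoA cur (w :: ws) =
                (if cur = [] then [] else [PySem.Chars.join [] cur]) ++ w :: mslGoA [] ws
              from by simp [mslGoA, h]]
          have hspan : mslSpan (w :: ws) = ([], w :: ws) := by simp [mslSpan, h]
          rw [hspan, mslGo_cons_neg w ws h]
          simp [hc, ih.1]

-- ===== VERDICT (by name: the statement is the Claim_ definition above) =====
theorem merge_single_letters_spec : Claim_equal_merge_single_letters := by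
  intro s _
  unfold Spec_merge_single_letters merge_single_letters merge_single_letters_alt
  simp only []
  rw [foldA_eq_goA, (goA_eq_go _).1, List.nil_append]
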